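-- pv_equiv track=rewrite | github.com/INSURGENT2/ParkingSystem_with_ANPR | backend/app.py | clean_plate_text
-- ===== SOURCE A (Python) =====
-- def clean_plate_text(text):
--     """Clean and validate the OCR result"""
--     # Remove non-alphanumeric characters
--     text = ''.join(c for c in text if c.isalnum())
--
--     # Convert 0/O and other common confusions
--     text = text.upper()
--
--     # Apply common correction patterns
--     replacements = {
--         '0': 'O',
--         '1': 'I',
--         '5': 'S',
--         '8': 'B',
--         '2': 'Z'
--     }
--
--     # Only apply replacements to letters in positions where they're commonly found
--     # For example, don't replace numbers in the numeric part of the license plate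
--     result = ""
--     for i, char in enumerate(text):
--         # For plates like BB8986, first 2 chars are typically letters
--         if i < 2 and char in replacements.keys():
--             result += replacements[char]
--         # For plates like BB8986, characters after position 2 are typically numbers
--         elif i >= 2 and char in replacements.values():
--             # Reverse the replacement (e.g., convert 'B' to '8' in the number portion)
--             reverse_map = {v: k for k, v in replacements.items()}
--             if char in reverse_map:
--                 result += reverse_map[char]
--             else:
--                 result += char
--         else:
--             result += char
--
--     return result
-- ===== SOURCE B (Python) =====
-- _FWD = str.maketrans('01582', 'OISBZ')
-- _REV = str.maketrans('OISBZ', '01582')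
--
--
-- def clean_plate_text(text):
--     """Clean and validate the OCR result (table-driven slice version)."""
--     cleaned = ''.join(c for c in text if c.isalnum()).upper()
--     return cleaned[:2].translate(_FWD) + cleaned[2:].translate(_REV)
-- ===== Notes on version B (the rewrite author's own statement) =====
-- stated objective: simpler
-- what changed: Replaces the per-character enumerate loop with its index branching and per-iteration reverse-dict construction by slicing the cleaned string into head/tail and applying two precomputed str.maketrans translation tables.
import Mathlib
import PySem

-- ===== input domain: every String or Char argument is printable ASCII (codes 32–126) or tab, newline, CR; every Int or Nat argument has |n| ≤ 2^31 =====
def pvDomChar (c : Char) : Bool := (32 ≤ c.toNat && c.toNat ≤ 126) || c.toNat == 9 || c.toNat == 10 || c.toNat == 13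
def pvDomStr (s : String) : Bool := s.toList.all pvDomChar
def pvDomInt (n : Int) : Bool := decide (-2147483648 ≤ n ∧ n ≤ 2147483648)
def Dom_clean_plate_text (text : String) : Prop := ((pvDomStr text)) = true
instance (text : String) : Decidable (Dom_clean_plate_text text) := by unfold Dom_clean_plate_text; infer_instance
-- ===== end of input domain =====

-- B replaces A's enumerate loop (index branching + reverse dict rebuilt per iteration)
-- by two slices each mapped through a fixed translation table; objective: simpler.

-- ===== PORT A =====
-- the 'replacements' dict literal of A
def pvRepl : PySem.Dict Char Char :=
  ((((PySem.Dict.empty.insert '0' 'O').insert '1' 'I').insert '5' 'S').insert '8' 'B').insert '2' 'Z'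

def clean_plate_text (text : String) : String :=
  let t := PySem.Chars.upper ((text.toList).filter PySem.Chars.isalnum)
  String.ofList ((PySem.List.enumerate t 0).foldl (fun res p =>
    if p.1 < 2 ∧ (pvRepl.keys).contains p.2 then
      res ++ [pvRepl.getD p.2 p.2]
    else if 2 ≤ p.1 ∧ (pvRepl.values).contains p.2 then
      let rev := pvRepl.items.foldl (fun d q => d.insert q.2 q.1) PySem.Dict.empty
      if rev.contains p.2 then res ++ [rev.getD p.2 p.2] else res ++ [p.2]
    else res ++ [p.2]) [])

-- ===== PORT B =====
-- the two maketrans tables of Source B as character functions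
def pvFwd (c : Char) : Char :=
  if c = '0' then 'O' else if c = '1' then 'I' else if c = '5' then 'S'
  else if c = '8' then 'B' else if c = '2' then 'Z' else c

def pvRev (c : Char) : Char :=
  if c = 'O' then '0' else if c = 'I' then '1' else if c = 'S' then '5'
  else if c = 'B' then '8' else if c = 'Z' then '2' else c

def clean_plate_text_alt (text : String) : String :=
  let t := PySem.Chars.upper ((text.toList).filter PySem.Chars.isalnum)
  String.ofList ((t.take 2).map pvFwd ++ (t.drop 2).map pvRev)

-- ===== PRECONDITION & SPEC =====
def Spec_clean_plate_text (text : String) (out : String) : Prop := out = clean_plate_text_alt text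
instance (text : String) (out : String) : Decidable (Spec_clean_plate_text text out) := by unfold Spec_clean_plate_text; infer_instance

-- ===== CLAIM (what is proved, stated in full; the proofs are below) =====
def Claim_equal_clean_plate_text : Prop := ∀ (text : String), Dom_clean_plate_text text → Spec_clean_plate_text text (clean_plate_text text)

-- ===== LEMMAS AND PROOFS =====

-- A's loop body as a pure per-character function of the index
def pvStepA (i : Int) (c : Char) : Char :=
  if i < 2 ∧ (pvRepl.keys).contains c then pvRepl.getD c c
  else if 2 ≤ i ∧ (pvRepl.values).contains c then
    let rev := pvRepl.items.foldl (fun d q => d.insert q.2 q.1) PySem.Dict.empty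
    if rev.contains c then rev.getD c c else c
  else c

lemma pvStepA_head (i : Int) (hi : i < 2) (c : Char) : pvStepA i c = pvFwd c := by
  by_cases h0 : c = '0'; · subst h0; simp only [pvStepA]; rw [if_pos ⟨hi, by decide⟩]; decide
  by_cases h1 : c = '1'; · subst h1; simp only [pvStepA]; rw [if_pos ⟨hi, by decide⟩]; decide
  by_cases h5 : c = '5'; · subst h5; simp only [pvStepA]; rw [if_pos ⟨hi, by decide⟩]; decide
  by_cases h8 : c = '8'; · subst h8; simp only [pvStepA]; rw [if_pos ⟨hi, by decide⟩]; decide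
  by_cases h2 : c = '2'; · subst h2; simp only [pvStepA]; rw [if_pos ⟨hi, by decide⟩]; decide
  have hkc : c ∉ pvRepl.keys := by
    rw [show pvRepl.keys = ['0', '1', '5', '8', '2'] from rfl]
    simp [h0, h1, h5, h8, h2]
  simp [pvStepA, pvFwd, hkc, h0, h1, h5, h8, h2, show ¬ (2:Int) ≤ i by omega]

lemma pvStepA_tail (i : Int) (hi : 2 ≤ i) (c : Char) : pvStepA i c = pvRev c := by
  have hni : ¬ i < 2 := by omega
  by_cases hO : c = 'O'
  · subst hO; simp only [pvStepA]; rw [if_neg (fun h => hni h.1), if_pos ⟨hi, by decide⟩]; decide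
  by_cases hI : c = 'I'
  · subst hI; simp only [pvStepA]; rw [if_neg (fun h => hni h.1), if_pos ⟨hi, by decide⟩]; decide
  by_cases hS : c = 'S'
  · subst hS; simp only [pvStepA]; rw [if_neg (fun h => hni h.1), if_pos ⟨hi, by decide⟩]; decide
  by_cases hB : c = 'B'
  · subst hB; simp only [pvStepA]; rw [if_neg (fun h => hni h.1), if_pos ⟨hi, by decide⟩]; decide
  by_cases hZ : c = 'Z'
  · subst hZ; simp only [pvStepA]; rw [if_neg (fun h => hni h.1), if_pos ⟨hi, by decide⟩]; decide
  have hvc : c ∉ pvRepl.values := by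
    rw [show pvRepl.values = ['O', 'I', 'S', 'B', 'Z'] from rfl]
    simp [hO, hI, hS, hB, hZ]
  simp [pvStepA, pvRev, hvc, hO, hI, hS, hB, hZ, hni]

lemma pv_tail_loop (l : List Char) : ∀ (s : Int), 2 ≤ s → ∀ (acc : List Char),
    (PySem.List.enumerate l s).foldl (fun res p => res ++ [pvStepA p.1 p.2]) acc
      = acc ++ l.map pvRev := by
  induction l with
  | nil => intro s _ acc; simp [PySem.List.enumerate_nil]
  | cons c l ih =>
    intro s hs acc
    rw [PySem.List.enumerate_cons, List.foldl_cons, ih (s + 1) (by omega)]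
    simp [pvStepA_tail s hs]

lemma pv_foldl_eq_step (l : List (Int × Char)) (acc : List Char) :
    l.foldl (fun res p =>
      if p.1 < 2 ∧ (pvRepl.keys).contains p.2 then res ++ [pvRepl.getD p.2 p.2]
      else if 2 ≤ p.1 ∧ (pvRepl.values).contains p.2 then
        let rev := pvRepl.items.foldl (fun d q => d.insert q.2 q.1) PySem.Dict.empty
        if rev.contains p.2 then res ++ [rev.getD p.2 p.2] else res ++ [p.2]
      else res ++ [p.2]) acc
    = l.foldl (fun res p => res ++ [pvStepA p.1 p.2]) acc := by
  induction l generalizing acc with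
  | nil => rfl
  | cons p l ih =>
    rw [List.foldl_cons, List.foldl_cons, ih]
    congr 1
    simp only [pvStepA]
    split_ifs <;> rfl

lemma pv_core (t : List Char) :
    (PySem.List.enumerate t 0).foldl (fun res p =>
      if p.1 < 2 ∧ (pvRepl.keys).contains p.2 then res ++ [pvRepl.getD p.2 p.2]
      else if 2 ≤ p.1 ∧ (pvRepl.values).contains p.2 then
        let rev := pvRepl.items.foldl (fun d q => d.insert q.2 q.1) PySem.Dict.empty
        if rev.contains p.2 then res ++ [rev.getD p.2 p.2] else res ++ [p.2]
      else res ++ [p.2]) []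
    = (t.take 2).map pvFwd ++ (t.drop 2).map pvRev := by
  rw [pv_foldl_eq_step]
  match t with
  | [] => simp [PySem.List.enumerate_nil]
  | [a] =>
    simp [PySem.List.enumerate_cons, PySem.List.enumerate_nil, pvStepA_head 0 (by omega)]
  | a :: b :: rest =>
    rw [PySem.List.enumerate_cons, PySem.List.enumerate_cons, List.foldl_cons, List.foldl_cons,
      pv_tail_loop rest (0 + 1 + 1) (by omega)]
    simp [pvStepA_head 0 (by omega), pvStepA_head 1 (by omega)]

-- ===== VERDICT (by name: the statement is the Claim_ definition above) =====
theorem clean_plate_text_spec : Claim_equal_clean_plate_text := by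
  intro text _
  unfold Spec_clean_plate_text
  simp only [clean_plate_text, clean_plate_text_alt]
  rw [pv_core]
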